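-- pv_equiv track=rewrite | github.com/idigitopia/Distributed-VI | gpu_vi_engine_s.py | get_offsets_and_block_sizes
-- ===== SOURCE A (Python) =====
-- def get_offsets_and_block_sizes(total_len, max_block_size):
--     ret_list = []
--     offset = 0
--     remaining = total_len
--     while remaining > 0:
--         if (remaining < max_block_size):
--             ret_list.append((offset, remaining))
--             remaining -= remaining
--             offset += remaining
--         else:
--             ret_list.append((offset, max_block_size))
--             remaining -= max_block_size
--             offset += max_block_size
--     return ret_list
-- ===== SOURCE B (Python) =====
-- def get_offsets_and_block_sizes(total_len, max_block_size):
--     if total_len <= 0: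
--         return []
--     full, rem = divmod(total_len, max_block_size)
--     blocks = [(i * max_block_size, max_block_size) for i in range(full)]
--     if rem:
--         blocks.append((full * max_block_size, rem))
--     return blocks
-- ===== Notes on version B (the rewrite author's own statement) =====
-- stated objective: simpler
-- what changed: Replaces the while-loop with running offset/remaining accumulators by a closed-form divmod: build the full blocks with a direct range comprehension and append the remainder block if nonzero.
import Mathlib
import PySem

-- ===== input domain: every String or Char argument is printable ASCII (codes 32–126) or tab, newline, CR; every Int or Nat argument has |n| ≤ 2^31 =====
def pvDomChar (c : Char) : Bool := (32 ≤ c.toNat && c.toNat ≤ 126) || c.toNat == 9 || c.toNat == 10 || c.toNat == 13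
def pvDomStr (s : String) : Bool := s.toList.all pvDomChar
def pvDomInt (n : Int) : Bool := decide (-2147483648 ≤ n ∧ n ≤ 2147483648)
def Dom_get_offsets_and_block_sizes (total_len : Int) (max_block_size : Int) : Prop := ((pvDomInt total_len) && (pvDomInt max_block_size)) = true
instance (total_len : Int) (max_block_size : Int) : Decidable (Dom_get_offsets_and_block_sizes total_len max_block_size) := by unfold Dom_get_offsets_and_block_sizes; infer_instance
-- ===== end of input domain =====

-- B replaces A's while-loop with running offset/remaining accumulators by a closed-form
-- divmod plus a direct range comprehension (objective: simpler).


-- ===== PORT A =====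
-- A's while-loop; fuel only makes the recursion total (the loop runs at most
-- remaining.toNat times whenever Pre_ holds, so the fuel is never exhausted there).
def pvALoop (fuel : Nat) (max_block_size : Int) (offset remaining : Int)
    (ret_list : List (Int × Int)) : List (Int × Int) :=
  match fuel with
  | 0 => ret_list
  | fuel + 1 =>
    if remaining > 0 then
      if remaining < max_block_size then
        -- remaining -= remaining; offset += remaining (adds the new remaining, i.e. 0)
        pvALoop fuel max_block_size (offset + (remaining - remaining)) (remaining - remaining)
          (ret_list ++ [(offset, remaining)])
      else
        pvALoop fuel max_block_size (offset + max_block_size) (remaining - max_block_size)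
          (ret_list ++ [(offset, max_block_size)])
    else ret_list

def get_offsets_and_block_sizes (total_len : Int) (max_block_size : Int) : List (Int × Int) :=
  pvALoop (total_len.toNat + 1) max_block_size 0 total_len []

-- ===== PORT B =====
def get_offsets_and_block_sizes_alt (total_len : Int) (max_block_size : Int) : List (Int × Int) :=
  if total_len ≤ 0 then []
  else
    let full := PySem.Int.floordiv total_len max_block_size
    let rem := PySem.Int.mod total_len max_block_size
    let blocks := (PySem.List.pyRange 0 full 1).map (fun i => (i * max_block_size, max_block_size))
    if rem ≠ 0 then blocks ++ [(full * max_block_size, rem)] else blocks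

-- ===== PRECONDITION & SPEC =====
-- Pre_ excludes only inputs where Python A never returns: for total_len > 0 and
-- max_block_size ≤ 0 the while-loop diverges (remaining never decreases).
def Pre_get_offsets_and_block_sizes (total_len : Int) (max_block_size : Int) : Prop :=
  total_len ≤ 0 ∨ 0 < max_block_size
instance (total_len : Int) (max_block_size : Int) : Decidable (Pre_get_offsets_and_block_sizes total_len max_block_size) := by unfold Pre_get_offsets_and_block_sizes; infer_instance
def pvWitness_get_offsets_and_block_sizes : Int × Int := (7, 3)

def Spec_get_offsets_and_block_sizes (total_len : Int) (max_block_size : Int) (out : List (Int × Int)) : Prop := out = get_offsets_and_block_sizes_alt total_len max_block_size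
instance (total_len : Int) (max_block_size : Int) (out : List (Int × Int)) : Decidable (Spec_get_offsets_and_block_sizes total_len max_block_size out) := by unfold Spec_get_offsets_and_block_sizes; infer_instance

-- ===== CLAIM (what is proved, stated in full; the proofs are below) =====
def Claim_equal_get_offsets_and_block_sizes : Prop := ∀ (total_len : Int) (max_block_size : Int), Dom_get_offsets_and_block_sizes total_len max_block_size → Pre_get_offsets_and_block_sizes total_len max_block_size → Spec_get_offsets_and_block_sizes total_len max_block_size (get_offsets_and_block_sizes total_len max_block_size)

-- ===== LEMMAS AND PROOFS =====

-- B's core output for a remaining amount r, as produced starting at offset 0.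
def pvCore (m r : Int) : List (Int × Int) :=
  (PySem.List.pyRange 0 (PySem.Int.floordiv r m) 1).map (fun i => (i * m, m)) ++
    (if PySem.Int.mod r m ≠ 0 then [(PySem.Int.floordiv r m * m, PySem.Int.mod r m)] else [])

theorem pv_fd_step (m r : Int) (hm : m ≠ 0) :
    PySem.Int.floordiv r m = PySem.Int.floordiv (r - m) m + 1 := by
  simp only [PySem.Int.floordiv]
  conv_lhs => rw [show r = (r - m) + 1 * m by ring]
  rw [Int.add_mul_fdiv_right _ _ hm]

theorem pv_fmod_step (m r : Int) :
    PySem.Int.mod r m = PySem.Int.mod (r - m) m := by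
  simp only [PySem.Int.mod]
  conv_lhs => rw [show r = (r - m) + 1 * m by ring]
  rw [Int.add_mul_fmod_self_right]

theorem pv_fd_small (m r : Int) (h1 : 0 ≤ r) (h2 : r < m) :
    PySem.Int.floordiv r m = 0 := by
  simp only [PySem.Int.floordiv]; exact Int.fdiv_eq_zero_of_lt h1 h2

theorem pv_fmod_small (m r : Int) (h1 : 0 ≤ r) (h2 : r < m) :
    PySem.Int.mod r m = r := by
  simp only [PySem.Int.mod]; exact Int.fmod_eq_of_lt h1 h2

theorem pv_fd_nonneg (m r : Int) (h1 : 0 ≤ r) (h2 : 0 < m) :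
    0 ≤ PySem.Int.floordiv r m := by
  simp only [PySem.Int.floordiv]; exact Int.fdiv_nonneg h1 h2.le

theorem pvCore_step (m r : Int) (hm : 0 < m) (hr : m ≤ r) :
    pvCore m r = (0, m) :: (pvCore m (r - m)).map (fun p => (p.1 + m, p.2)) := by
  have hfge : 0 ≤ PySem.Int.floordiv (r - m) m := pv_fd_nonneg m (r - m) (by omega) hm
  unfold pvCore
  rw [pv_fd_step m r hm.ne', pv_fmod_step m r,
    PySem.List.pyRange_one, PySem.List.pyRange_one,
    show (PySem.Int.floordiv (r - m) m + 1 - 0).toNat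
      = (PySem.Int.floordiv (r - m) m - 0).toNat + 1 by omega,
    List.range_succ_eq_map]
  simp only [List.map_cons, List.map_map, List.map_append]
  refine congrArg₂ List.cons (by norm_num) ?_
  rw [List.append_eq]
  refine congrArg₂ (· ++ ·) ?_ ?_
  · refine List.map_congr_left (fun k _ => ?_)
    simp only [Function.comp_apply, Prod.mk.injEq, Nat.succ_eq_add_one, and_true]
    push_cast; ring
  · split_ifs with h
    · simp only [List.map_cons, List.map_nil, Prod.mk.injEq, and_true]
      ring
    · simp

theorem pvALoop_eq (fuel : Nat) (m : Int) (hm : 0 < m) :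
    ∀ (offset r : Int) (acc : List (Int × Int)), r.toNat < fuel →
    pvALoop fuel m offset r acc =
      acc ++ (if 0 < r then (pvCore m r).map (fun p => (offset + p.1, p.2)) else []) := by
  induction fuel with
  | zero => intro _ _ _ h; omega
  | succ fuel ih =>
    intro offset r acc hfuel
    by_cases hr : 0 < r
    · rw [pvALoop]
      simp only [hr, if_pos]
      by_cases hlt : r < m
      · -- last partial block
        simp only [hlt, if_pos]
        rw [show r - r = 0 by ring]
        have hstop : pvALoop fuel m (offset + 0) 0 (acc ++ [(offset, r)]) = acc ++ [(offset, r)] := by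
          cases fuel with
          | zero => rw [pvALoop]
          | succ f => rw [pvALoop]; simp
        rw [hstop]
        simp [pvCore, pv_fd_small m r (by omega) hlt, pv_fmod_small m r (by omega) hlt,
          hr.ne']
      · -- full block
        simp only [hlt, if_neg, not_false_iff]
        rw [ih (offset + m) (r - m) (acc ++ [(offset, m)]) (by omega)]
        by_cases hr' : 0 < r - m
        · simp only [hr', if_pos, pvCore_step m r hm (by omega)]
          have hfun : (fun p : Int × Int => (offset + m + p.1, p.2))
              = (fun p : Int × Int => (offset + p.1, p.2)) ∘ (fun p : Int × Int => (p.1 + m, p.2)) := by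
            funext p; simp; ring
          simp [hfun, List.map_map]
        · simp only [hr', if_neg, not_false_iff]
          have hcz : pvCore m (r - m) = [] := by
            simp [pvCore, show r - m = 0 by omega, PySem.Int.floordiv, PySem.Int.mod,
              Int.zero_fdiv, Int.zero_fmod]
          rw [pvCore_step m r hm (by omega), hcz]
          simp
    · rw [pvALoop]
      simp [hr]

-- ===== VERDICT (by name: the statement is the Claim_ definition above) =====
theorem get_offsets_and_block_sizes_spec : Claim_equal_get_offsets_and_block_sizes := by
  intro tl m _ hpre
  unfold Spec_get_offsets_and_block_sizes get_offsets_and_block_sizes get_offsets_and_block_sizes_alt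
  by_cases htl : tl ≤ 0
  · rw [pvALoop]
    simp [htl]
  · have hm : 0 < m := by
      cases hpre with
      | inl h => omega
      | inr h => exact h
    rw [pvALoop_eq (tl.toNat + 1) m hm 0 tl [] (by omega)]
    simp only [htl, if_neg, not_false_iff, show 0 < tl by omega, if_pos, List.nil_append]
    unfold pvCore
    split_ifs with h <;> simp
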